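-- pv_equiv track=rewrite | github.com/nastja123456789/tests | task1/task1.py | circular_array
-- ===== SOURCE A (Python) =====
-- def circular_array(n, m):
--     array = list(range(1, n + 1))
--     path = []
--     current_index = 0
-- # пример - 1 2 3 4 5
--     while True:
--         path.append(array[current_index])
--         current_index = (current_index + m - 1) % n
--         if current_index==0:
--             break
--     return path
-- ===== SOURCE B (Python) =====
-- def circular_array(n, m):
--     s = (m - 1) % n
--     g, t = n, s
--     while t:
--         g, t = t, g % t
--     return [(i * s) % n + 1 for i in range(n // g)]
-- ===== Notes on version B (the rewrite author's own statement) =====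
-- stated objective: faster
-- what changed: Replaces A's while-True walk with an accumulator and break-on-return-to-0 by a closed form: step s=(m-1)%n, orbit length n//gcd(n,s) via Euclid, and a single comprehension [(i*s)%n+1 for i in range(n//gcd)] (also avoids materialising the 1..n array).
import Mathlib
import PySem

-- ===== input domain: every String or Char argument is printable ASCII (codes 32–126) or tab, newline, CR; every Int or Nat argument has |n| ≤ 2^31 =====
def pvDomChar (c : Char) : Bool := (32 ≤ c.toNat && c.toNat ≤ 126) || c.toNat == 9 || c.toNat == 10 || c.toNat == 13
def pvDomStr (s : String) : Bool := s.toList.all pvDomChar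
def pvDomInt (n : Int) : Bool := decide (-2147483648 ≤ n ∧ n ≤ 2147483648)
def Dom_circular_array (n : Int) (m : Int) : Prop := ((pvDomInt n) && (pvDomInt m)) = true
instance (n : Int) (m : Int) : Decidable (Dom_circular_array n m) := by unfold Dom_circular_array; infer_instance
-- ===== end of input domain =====

-- B replaces A's while-True accumulator walk by a closed form: step s = (m-1) % n,
-- orbit length n // gcd(n, s), and a comprehension of (i*s) % n + 1 (objective: faster, measured).

-- ===== PORT A =====
-- A's while-True loop; the fuel argument only makes it total (it is never exhausted
-- under Pre_); on an out-of-range index (Python IndexError, excluded by Pre_) it stops.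
def circularLoopA (n : Int) (m : Int) (array : List Int) : Nat → Int → List Int → List Int
  | 0, _, path => path
  | fuel+1, ci, path =>
    match PySem.List.pyGet? array ci with
    | none => path
    | some v =>
      let path' := path ++ [v]
      let ci' := PySem.Int.mod (ci + m - 1) n
      if ci' = 0 then path' else circularLoopA n m array fuel ci' path'

def circular_array (n : Int) (m : Int) : List Int :=
  let array := PySem.List.pyRange 1 (n+1) 1
  circularLoopA n m array (n.toNat + 1) 0 []

-- ===== PORT B =====
-- B's Euclid loop 'while t: g, t = t, g % t'; the fuel argument only makes it total
-- (t strictly decreases while nonnegative, so it is never exhausted under Pre_).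
def gcdLoopB : Nat → Int → Int → Int
  | 0, g, _ => g
  | fuel+1, g, t => if t = 0 then g else gcdLoopB fuel t (PySem.Int.mod g t)

def circular_array_alt (n : Int) (m : Int) : List Int :=
  let s := PySem.Int.mod (m - 1) n
  let g := gcdLoopB (s.natAbs + 1) n s
  (PySem.List.pyRange 0 (PySem.Int.floordiv n g) 1).map (fun i => PySem.Int.mod (i * s) n + 1)

-- ===== PRECONDITION & SPEC =====
-- Pre_ excludes exactly n ≤ 0, on which A raises IndexError (array[0] on an empty list).
def Pre_circular_array (n : Int) (m : Int) : Prop := 1 ≤ n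
instance (n : Int) (m : Int) : Decidable (Pre_circular_array n m) := by unfold Pre_circular_array; infer_instance
def pvWitness_circular_array : Int × Int := (5, 2)

def Spec_circular_array (n : Int) (m : Int) (out : List Int) : Prop := out = circular_array_alt n m
instance (n : Int) (m : Int) (out : List Int) : Decidable (Spec_circular_array n m out) := by unfold Spec_circular_array; infer_instance

-- ===== CLAIM (what is proved, stated in full; the proofs are below) =====
def Claim_equal_circular_array : Prop := ∀ (n : Int) (m : Int), Dom_circular_array n m → Pre_circular_array n m → Spec_circular_array n m (circular_array n m)

-- ===== LEMMAS AND PROOFS =====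

-- B's Euclid loop computes Nat.gcd when given enough fuel
lemma gcdLoopB_eq : ∀ (fuel a b : Nat), b < fuel → gcdLoopB fuel (a : Int) (b : Int) = (Nat.gcd a b : Int) := by
  intro fuel
  induction fuel with
  | zero => intro a b h; omega
  | succ f ih =>
    intro a b h
    by_cases hb : b = 0
    · subst hb; simp [gcdLoopB]
    · have hb' : ((b : Int)) ≠ 0 := by exact_mod_cast hb
      have hbpos : 0 < b := Nat.pos_of_ne_zero hb
      rw [gcdLoopB, if_neg hb', PySem.Int.mod_natCast,
          ih b (a % b) (by have := Nat.mod_lt a hbpos; omega)]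
      rw [Nat.gcd_comm a b, Nat.gcd_rec b a, Nat.gcd_comm]

-- the orbit of index 0 under +σ (mod N) returns to 0 exactly at multiples of N / gcd N σ
lemma orbit_zero_iff (N σ : Nat) (hN : 0 < N) (k : Nat) :
    (k * σ) % N = 0 ↔ (N / Nat.gcd N σ) ∣ k := by
  have hg : 0 < Nat.gcd N σ := Nat.gcd_pos_of_pos_left σ hN
  have hcop0 := Nat.coprime_div_gcd_div_gcd (m := N) (n := σ) hg
  have hLmul := Nat.mul_div_cancel' (Nat.gcd_dvd_left N σ)
  have hσmul := Nat.mul_div_cancel' (Nat.gcd_dvd_right N σ)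
  set g := Nat.gcd N σ with hgdef
  set L := N / g with hLdef
  set σ' := σ / g with hσdef
  rw [← Nat.dvd_iff_mod_eq_zero]
  constructor
  · intro hdvd
    have h2 : g * L ∣ g * (k * σ') := by
      rw [hLmul]
      calc N ∣ k * σ := hdvd
        _ = g * (k * σ') := by rw [← hσmul]; ring
    exact hcop0.dvd_of_dvd_mul_right ((Nat.mul_dvd_mul_iff_left hg).mp h2)
  · intro hdvd
    obtain ⟨c, hc⟩ := hdvd
    exact ⟨c * σ', by rw [← hLmul, ← hσmul, hc]; ring⟩

-- one index update of A's loop, written on the Nat orbit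
lemma ci_step (N σ : Nat) (m : Int) (hN : 0 < N) (hs : PySem.Int.mod (m - 1) (N : Int) = (σ : Int)) (k : Nat) :
    PySem.Int.mod ((((k * σ) % N : Nat) : Int) + m - 1) (N : Int) = ((((k+1) * σ) % N : Nat) : Int) := by
  have hNpos : (0:Int) < (N:Int) := by exact_mod_cast hN
  have hq := PySem.Int.floordiv_mul_add_mod (m-1) (N:Int)
  rw [hs] at hq
  rw [PySem.Int.mod_eq_emod_of_pos hNpos]
  have hsplit : (((k*σ)%N : Nat) : Int) + m - 1
      = ((((k*σ)%N + σ : Nat)) : Int) + PySem.Int.floordiv (m-1) (N:Int) * (N:Int) := by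
    push_cast
    omega
  rw [hsplit, Int.add_mul_emod_self_right, ← Int.natCast_mod]
  congr 1
  rw [Nat.mod_add_mod]
  congr 1
  ring

-- unrolling A's loop along the orbit: from index (k*σ) % N with d steps left it appends
-- exactly the d remaining orbit values
lemma loopA_eq (N σ : Nat) (m : Int) (hN : 0 < N)
    (hs : PySem.Int.mod (m - 1) (N : Int) = (σ : Int)) :
    ∀ (d k : Nat) (path : List Int) (fuel : Nat), k + d = N / Nat.gcd N σ → 0 < d → d ≤ fuel →
    circularLoopA (N : Int) m (PySem.List.pyRange 1 ((N : Int)+1) 1) fuel ((((k * σ) % N : Nat) : Int)) path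
      = path ++ (List.range d).map (fun i => ((((k + i) * σ) % N : Nat) : Int) + 1) := by
  intro d
  induction d with
  | zero => omega
  | succ d' ih =>
    intro k path fuel hkd hd hf
    obtain ⟨f, rfl⟩ : ∃ f, fuel = f + 1 := ⟨fuel - 1, by omega⟩
    have hidx : (k * σ) % N < N := Nat.mod_lt _ hN
    have hget : PySem.List.pyGet? (PySem.List.pyRange 1 ((N : Int)+1) 1) ((((k * σ) % N : Nat) : Int))
        = some (1 + (((k * σ) % N : Nat) : Int)) := by
      have hc : (k * σ) % N < (((N:Int)+1)-1).toNat := by simpa using hidx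
      rw [PySem.List.pyGet?_natCast, PySem.List.getElem?_pyRange_one, if_pos hc]
    rw [circularLoopA, hget]
    simp only []
    rw [ci_step N σ m hN hs k]
    have hL1 : 1 ≤ N / Nat.gcd N σ := by
      have hle : Nat.gcd N σ ≤ N := Nat.le_of_dvd hN (Nat.gcd_dvd_left N σ)
      have hg : 0 < Nat.gcd N σ := Nat.gcd_pos_of_pos_left σ hN
      exact Nat.one_le_div_iff hg |>.mpr hle
    by_cases hlast : d' = 0
    · subst hlast
      have hz : ((k+1) * σ) % N = 0 := by
        rw [orbit_zero_iff N σ hN]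
        exact ⟨1, by omega⟩
      rw [hz]
      simp only [Nat.cast_zero, reduceIte]
      rw [List.range_one, List.map_cons, List.map_nil]
      congr 2
      rw [Nat.add_zero]
      exact add_comm 1 _
    · have hnz : ((k+1) * σ) % N ≠ 0 := by
        intro hcontr
        obtain ⟨c, hc⟩ := (orbit_zero_iff N σ hN (k+1)).mp hcontr
        rcases Nat.eq_zero_or_pos c with h0 | hc1
        · subst h0; simp at hc
        · have : N / Nat.gcd N σ ≤ k + 1 := by
            calc N / Nat.gcd N σ = N / Nat.gcd N σ * 1 := (Nat.mul_one _).symm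
              _ ≤ N / Nat.gcd N σ * c := Nat.mul_le_mul_left _ hc1
              _ = k + 1 := hc.symm
          omega
      have hnz' : ((((k+1) * σ) % N : Nat) : Int) ≠ 0 := by exact_mod_cast hnz
      rw [if_neg hnz']
      rw [ih (k+1) (path ++ [1 + (((k * σ) % N : Nat) : Int)]) f (by omega) (by omega) (by omega)]
      rw [List.append_assoc, List.range_succ_eq_map, List.map_cons, List.map_map]
      simp only [List.singleton_append]
      congr 1
      congr 1
      · rw [Nat.add_zero]; exact add_comm 1 _
      · apply List.map_congr_left
        intro i _
        have hki : k + 1 + i = k + (i + 1) := by omega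
        simp [Function.comp, hki]

-- ===== VERDICT (by name: the statement is the Claim_ definition above) =====
theorem circular_array_spec : Claim_equal_circular_array := by
  unfold Claim_equal_circular_array
  intro n m _ hpre
  unfold Pre_circular_array at hpre
  unfold Spec_circular_array
  obtain ⟨N, rfl⟩ : ∃ N : Nat, n = (N : Int) := ⟨n.toNat, (Int.toNat_of_nonneg (by omega)).symm⟩
  have hN : 0 < N := by exact_mod_cast hpre
  have hNpos : (0:Int) < (N:Int) := by exact_mod_cast hN
  obtain ⟨σ, hσeq⟩ : ∃ σ : Nat, PySem.Int.mod (m - 1) (N : Int) = (σ : Int) :=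
    ⟨(PySem.Int.mod (m - 1) (N : Int)).toNat,
     (Int.toNat_of_nonneg (PySem.Int.mod_nonneg _ hNpos)).symm⟩
  -- B's value
  have hB : circular_array_alt (N : Int) m
      = (List.range (N / Nat.gcd N σ)).map (fun i => ((((i * σ) % N : Nat) : Int) + 1)) := by
    unfold circular_array_alt
    simp only [hσeq, Int.natAbs_natCast]
    rw [gcdLoopB_eq (σ+1) N σ (by omega), PySem.Int.floordiv_natCast,
        PySem.List.pyRange_zero_natCast, List.map_map]
    apply List.map_congr_left
    intro i _
    simp only [Function.comp]
    rw [show ((i : Int)) * (σ : Int) = (((i * σ : Nat)) : Int) by push_cast; ring,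
        PySem.Int.mod_natCast]
  -- A's value
  have hA : circular_array (N : Int) m
      = (List.range (N / Nat.gcd N σ)).map (fun i => ((((i * σ) % N : Nat) : Int) + 1)) := by
    unfold circular_array
    have hL1 : 1 ≤ N / Nat.gcd N σ := by
      have hle : Nat.gcd N σ ≤ N := Nat.le_of_dvd hN (Nat.gcd_dvd_left N σ)
      have hg : 0 < Nat.gcd N σ := Nat.gcd_pos_of_pos_left σ hN
      exact Nat.one_le_div_iff hg |>.mpr hle
    have hLN : N / Nat.gcd N σ ≤ N := Nat.div_le_self _ _
    have h0 : ((0 : Int)) = (((0 * σ) % N : Nat) : Int) := by simp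
    rw [show (((N : Int)).toNat + 1) = N + 1 by rw [Int.toNat_natCast], h0,
        loopA_eq N σ m hN hσeq (N / Nat.gcd N σ) 0 [] (N+1) (by omega) (by omega) (by omega)]
    simp only [List.nil_append]
    apply List.map_congr_left
    intro i _
    rw [Nat.zero_add]
  rw [hA, hB]
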